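-- pv_equiv track=rewrite | github.com/HongnamKim/Algorithm | python/뉴스_클러스터링.py | to_bigrams
-- ===== SOURCE A (Python) =====
-- def to_bigrams(s):
--     s = s.lower()
--     out = []
--     for i in range(len(s) - 1):
--         a, b = s[i], s[i + 1]
--         if a.isalpha() and b.isalpha() and a.isascii() and b.isascii():
--             out.append(a + b)
--     return out
-- ===== SOURCE B (Python) =====
-- def to_bigrams(s):
--     s = s.lower()
--     # Phase 1: split s into maximal runs of ASCII-alphabetic characters.
--     runs = []
--     cur = ""
--     for c in s:
--         if c.isalpha() and c.isascii():
--             cur += c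
--         elif cur:
--             runs.append(cur)
--             cur = ""
--     if cur:
--         runs.append(cur)
--     # Phase 2: every run of length L contributes its L-1 adjacent pairs;
--     # no validity test is needed here, runs contain only valid characters.
--     return [a + b for r in runs for a, b in zip(r, r[1:])]
-- ===== Notes on version B (the rewrite author's own statement) =====
-- stated objective: alternative
-- what changed: Instead of testing both characters of every adjacent pair, B first tokenizes the string into maximal runs of ASCII-alphabetic characters, then emits the adjacent pairs inside each run with no per-pair validity test.
import Mathlib
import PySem

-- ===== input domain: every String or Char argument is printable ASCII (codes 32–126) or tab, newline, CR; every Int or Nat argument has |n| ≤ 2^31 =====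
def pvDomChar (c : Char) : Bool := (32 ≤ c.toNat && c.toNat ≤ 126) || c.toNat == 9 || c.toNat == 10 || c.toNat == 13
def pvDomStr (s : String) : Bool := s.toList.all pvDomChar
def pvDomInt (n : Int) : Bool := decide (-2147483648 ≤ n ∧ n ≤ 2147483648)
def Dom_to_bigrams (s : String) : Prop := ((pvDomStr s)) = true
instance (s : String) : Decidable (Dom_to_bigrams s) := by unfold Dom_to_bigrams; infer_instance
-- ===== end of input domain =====

-- B replaces A's per-pair double validity test by a two-phase algorithm: tokenize the
-- lowered string into maximal runs of ASCII-alphabetic characters, then emit the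
-- adjacent pairs inside each run (no validity test in the second phase). Same cost.

-- c.isascii(): codepoint < 128 (hand port, exact: Python tests ord(c) < 0x80)
def pyIsascii (c : Char) : Bool := c.toNat < 128

-- ===== PORT A =====
def to_bigrams (s : String) : List String :=
  let cs := PySem.Chars.lower s.toList
  (PySem.List.pyRange 0 ((cs.length : Int) - 1) 1).foldl
    (fun out i =>
      let a := PySem.List.pyGetD cs i ' '
      let b := PySem.List.pyGetD cs (i + 1) ' '
      if PySem.Chars.isalpha a && PySem.Chars.isalpha b && pyIsascii a && pyIsascii b then
        out ++ [String.mk [a, b]]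
      else out) []

-- ===== PORT B =====
def bigramOk (c : Char) : Bool := PySem.Chars.isalpha c && pyIsascii c

-- one step of B's phase 1: state is (runs so far, current run)
def runStep (st : List (List Char) × List Char) (c : Char) : List (List Char) × List Char :=
  if bigramOk c then (st.1, st.2 ++ [c])
  else if st.2 ≠ [] then (st.1 ++ [st.2], [])
  else st

-- phase 2: the adjacent pairs of one run
def runBigrams (r : List Char) : List String :=
  (r.zip r.tail).map (fun p => String.mk [p.1, p.2])

def to_bigrams_alt (s : String) : List String :=
  let cs := PySem.Chars.lower s.toList
  let st := cs.foldl runStep ([], [])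
  let runs := if st.2 ≠ [] then st.1 ++ [st.2] else st.1
  runs.flatMap runBigrams

-- ===== PRECONDITION & SPEC =====
def Spec_to_bigrams (s : String) (out : List String) : Prop := out = to_bigrams_alt s
instance (s : String) (out : List String) : Decidable (Spec_to_bigrams s out) := by unfold Spec_to_bigrams; infer_instance

-- ===== CLAIM (what is proved, stated in full; the proofs are below) =====
def Claim_equal_to_bigrams : Prop := ∀ (s : String), Dom_to_bigrams s → Spec_to_bigrams s (to_bigrams s)

-- ===== LEMMAS AND PROOFS =====

-- the common middle form: bigrams as a zip-filter-map over adjacent pairs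
def zf (cs : List Char) : List String :=
  ((cs.zip cs.tail).filter (fun p => bigramOk p.1 && bigramOk p.2)).map
    (fun p => String.mk [p.1, p.2])

-- A's Nat-indexed loop equals the zip-filter-map form, accumulator generalized
theorem bigrams_aux (cs : List Char) (out : List String) :
    (List.range (cs.length - 1)).foldl
      (fun o k =>
        if PySem.Chars.isalpha (cs.getD k ' ') && PySem.Chars.isalpha (cs.getD (k + 1) ' ')
            && pyIsascii (cs.getD k ' ') && pyIsascii (cs.getD (k + 1) ' ') then
          o ++ [String.mk [cs.getD k ' ', cs.getD (k + 1) ' ']]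
        else o) out
    = out ++ zf cs := by
  induction cs generalizing out with
  | nil => simp [zf]
  | cons c cs ih =>
    cases cs with
    | nil => simp [zf]
    | cons b rest =>
      have hr : (c :: b :: rest : List Char).length - 1 = rest.length + 1 := by simp
      rw [hr]
      rw [List.range_succ_eq_map, List.foldl_cons, List.foldl_map]
      simp only [List.getD_cons_zero, List.getD_cons_succ]
      simp only [List.length_cons, Nat.add_sub_cancel, List.getD_cons_succ] at ih
      have hz : (c :: b :: rest).zip (c :: b :: rest).tail
          = (c, b) :: ((b :: rest).zip (b :: rest).tail) := by simp [List.zip]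
      by_cases h : (PySem.Chars.isalpha c && PySem.Chars.isalpha b
          && pyIsascii c && pyIsascii b) = true
      · rw [if_pos h, ih, List.append_assoc]
        congr 1
        simp only [Bool.and_eq_true] at h
        obtain ⟨⟨⟨h1, h2⟩, h3⟩, h4⟩ := h
        rw [zf, zf, hz, List.filter_cons_of_pos (by simp [bigramOk, h1, h2, h3, h4]),
          List.map_cons]
        simp
      · rw [if_neg h, ih]
        congr 1
        rw [zf, zf, hz, List.filter_cons_of_neg]
        simp only [bigramOk, Bool.and_eq_true] at h ⊢
        tauto

-- A equals zf on the lowered character list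
theorem a_eq_zf (cs : List Char) :
    (PySem.List.pyRange 0 ((cs.length : Int) - 1) 1).foldl
      (fun out i =>
        let a := PySem.List.pyGetD cs i ' '
        let b := PySem.List.pyGetD cs (i + 1) ' '
        if PySem.Chars.isalpha a && PySem.Chars.isalpha b && pyIsascii a && pyIsascii b then
          out ++ [String.mk [a, b]]
        else out) []
    = zf cs := by
  cases cs with
  | nil => simp [PySem.List.pyRange_one_eq_nil, zf]
  | cons c t =>
    rw [show (((c :: t).length : Int) - 1) = ((t.length : Nat) : Int) by simp]
    rw [PySem.List.pyRange_zero_nat, List.foldl_map]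
    simp only [← Nat.cast_add_one, PySem.List.pyGetD_natCast]
    have h := bigrams_aux (c :: t) []
    simpa using h

-- unfolding zf on two or more leading characters
theorem zf_cons_cons (a b : Char) (l : List Char) :
    zf (a :: b :: l)
      = (if bigramOk a && bigramOk b then [String.mk [a, b]] else []) ++ zf (b :: l) := by
  by_cases h : (bigramOk a && bigramOk b) = true
  · simp [zf, List.zip, h]
  · simp [zf, List.zip, h]

-- an invalid first character contributes nothing
theorem zf_cons_not (c : Char) (cs : List Char) (h : bigramOk c = false) :
    zf (c :: cs) = zf cs := by
  cases cs with
  | nil => simp [zf]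
  | cons b t => rw [zf_cons_cons, h]; simp

-- a valid run followed by an invalid character contributes exactly its own pairs
theorem zf_run (cur : List Char) (c : Char) (cs : List Char)
    (hall : ∀ x ∈ cur, bigramOk x = true) (hc : bigramOk c = false) :
    zf (cur ++ c :: cs) = runBigrams cur ++ zf cs := by
  induction cur with
  | nil => simpa [runBigrams] using zf_cons_not c cs hc
  | cons x cur ih =>
    have hx : bigramOk x = true := hall x (by simp)
    have hall' : ∀ y ∈ cur, bigramOk y = true := fun y hy => hall y (by simp [hy])
    cases cur with
    | nil =>
      rw [List.cons_append, List.nil_append, zf_cons_cons, hc]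
      simp [zf_cons_not c cs hc, runBigrams]
    | cons y t =>
      have hy : bigramOk y = true := hall' y (by simp)
      rw [List.cons_append, List.cons_append, zf_cons_cons, hx, hy]
      rw [show (y :: t) ++ c :: cs = (y :: t) ++ c :: cs from rfl] at ih
      rw [← List.cons_append, ih hall']
      simp [runBigrams, List.zip]
      
-- a fully valid list keeps all its adjacent pairs
theorem zf_all (cur : List Char) (hall : ∀ x ∈ cur, bigramOk x = true) :
    zf cur = runBigrams cur := by
  unfold zf runBigrams
  congr 1
  apply List.filter_eq_self.mpr
  intro p hp
  obtain ⟨h1, h2⟩ := List.of_mem_zip hp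
  simp [hall p.1 h1, hall p.2 (List.mem_of_mem_tail h2)]

-- B's fold with its invariant: the current run holds only valid characters
theorem b_main (cs : List Char) : ∀ (runs : List (List Char)) (cur : List Char),
    (∀ x ∈ cur, bigramOk x = true) →
    (let st := cs.foldl runStep (runs, cur)
     (if st.2 ≠ [] then st.1 ++ [st.2] else st.1).flatMap runBigrams)
    = runs.flatMap runBigrams ++ zf (cur ++ cs) := by
  induction cs with
  | nil =>
    intro runs cur hall
    simp only [List.foldl_nil, List.append_nil]
    rw [zf_all cur hall]
    by_cases h : cur = []
    · simp [h, runBigrams]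
    · simp [h]
  | cons c cs ih =>
    intro runs cur hall
    simp only [List.foldl_cons]
    by_cases hc : bigramOk c = true
    · rw [show runStep (runs, cur) c = (runs, cur ++ [c]) by simp [runStep, hc]]
      have hall' : ∀ x ∈ cur ++ [c], bigramOk x = true := by
        intro x hx
        rcases List.mem_append.mp hx with h | h
        · exact hall x h
        · simp at h; subst h; exact hc
      rw [ih runs (cur ++ [c]) hall']
      simp
    · have hc' : bigramOk c = false := by simpa using hc
      by_cases hcur : cur = []
      · subst hcur
        rw [show runStep (runs, ([] : List Char)) c = (runs, []) by simp [runStep, hc']]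
        rw [ih runs [] (by simp)]
        simp [zf_cons_not c cs hc']
      · rw [show runStep (runs, cur) c = (runs ++ [cur], []) by simp [runStep, hc', hcur]]
        rw [ih (runs ++ [cur]) [] (by simp)]
        rw [zf_run cur c cs hall hc']
        simp

-- ===== VERDICT (by name: the statement is the Claim_ definition above) =====
theorem to_bigrams_spec : Claim_equal_to_bigrams := by
  intro s _
  unfold Spec_to_bigrams to_bigrams to_bigrams_alt
  rw [a_eq_zf]
  have h := b_main (PySem.Chars.lower s.toList) [] [] (by simp)
  simpa using h.symm
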